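-- pv_equiv track=rewrite | github.com/D-Roberts/numerical_ml_algorithms_python | hrank_ml/craig_MLP.py | get_label_voc
-- ===== SOURCE A (Python) =====
-- def get_label_voc(y):
-- 	classes = {}
-- 	ind = 1
-- 	for i in range(len(y)):
-- 		if y[i] not in classes:
-- 			classes[y[i]] = ind
-- 			ind += 1
-- 	return classes
-- ===== SOURCE B (Python) =====
-- def get_label_voc(y):
--     # Overwriting in reversed order leaves each label mapped to its FIRST position.
--     first = {}
--     for pos, label in reversed(list(enumerate(y))):
--         first[label] = pos
--     order = sorted(first, key=lambda label: first[label])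
--     return {label: rank for rank, label in enumerate(order, 1)}
-- ===== Notes on version B (the rewrite author's own statement) =====
-- stated objective: alternative
-- what changed: Replaces A's guarded single pass with a manual counter by a sort-based algorithm: a reversed overwrite pass records each label's first-occurrence position, labels are sorted by that position, and ranks are assigned by enumeration.
import Mathlib
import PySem

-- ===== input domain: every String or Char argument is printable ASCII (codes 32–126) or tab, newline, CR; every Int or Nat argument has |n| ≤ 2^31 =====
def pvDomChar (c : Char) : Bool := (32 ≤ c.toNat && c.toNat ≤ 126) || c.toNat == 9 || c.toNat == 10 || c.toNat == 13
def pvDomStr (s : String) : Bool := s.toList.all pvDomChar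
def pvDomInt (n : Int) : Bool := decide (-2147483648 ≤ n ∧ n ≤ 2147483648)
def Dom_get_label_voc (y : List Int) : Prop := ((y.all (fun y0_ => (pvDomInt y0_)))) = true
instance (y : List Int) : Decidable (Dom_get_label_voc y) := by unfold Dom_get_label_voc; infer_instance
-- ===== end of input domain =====

-- B replaces A's guarded single pass with a sort-based algorithm: a reversed overwrite pass
-- records each label's first-occurrence position, labels are sorted by that position, ranks by enumeration.

-- ===== PORT A =====
-- for i in range(len(y)): if y[i] not in classes: classes[y[i]] = ind; ind += 1
def get_label_voc (y : List Int) : List (Int × Int) :=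
  ((PySem.List.pyRange 0 (y.length : Int) 1).foldl
      (fun (st : PySem.Dict Int Int × Int) i =>
        if st.1.contains (PySem.List.pyGetD y i 0) then st
        else (st.1.insert (PySem.List.pyGetD y i 0) st.2, st.2 + 1))
      (PySem.Dict.empty, 1)).1.items

-- ===== PORT B =====
-- for pos, label in reversed(list(enumerate(y))): first[label] = pos
-- order = sorted(first, key=lambda label: first[label])   -- first[label] ported as getD (label is a key)
-- return {label: rank for rank, label in enumerate(order, 1)}
def get_label_voc_alt (y : List Int) : List (Int × Int) :=
  let first : PySem.Dict Int Int :=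
    (PySem.List.enumerate y 0).reverse.foldl (fun d p => d.insert p.2 p.1) PySem.Dict.empty
  let order := PySem.List.sorted first.keys (fun label => first.getD label 0)
  ((PySem.List.enumerate order 1).foldl
      (fun (d : PySem.Dict Int Int) p => d.insert p.2 p.1)
      PySem.Dict.empty).items

-- ===== PRECONDITION & SPEC =====
def Spec_get_label_voc (y : List Int) (out : List (Int × Int)) : Prop := out = get_label_voc_alt y
instance (y : List Int) (out : List (Int × Int)) : Decidable (Spec_get_label_voc y out) := by unfold Spec_get_label_voc; infer_instance

-- ===== CLAIM (what is proved, stated in full; the proofs are below) =====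
def Claim_equal_get_label_voc : Prop := ∀ (y : List Int), Dom_get_label_voc y → Spec_get_label_voc y (get_label_voc y)

-- ===== LEMMAS AND PROOFS =====

/-- items of the voc dict built over the distinct labels `s` numbered from `k`. -/
def pvNumbered (s : List Int) (k : Int) : List (Int × Int) :=
  (PySem.List.enumerate s k).map (fun p => (p.2, p.1))

theorem pvNumbered_append_singleton (s : List Int) (x k : Int) :
    pvNumbered (s ++ [x]) k = pvNumbered s k ++ [(x, k + s.length)] := by
  simp [pvNumbered, PySem.List.enumerate_append, PySem.List.enumerate_cons]

theorem pvNumbered_keys (s : List Int) (k : Int) :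
    (pvNumbered s k).map (·.1) = s := by
  simp [pvNumbered, List.map_map, Function.comp_def]

/-- invariant for A's loop: starting from the dict over distinct labels `s`, folding
    the remaining labels yields the dict over `Set.update s ys`. -/
theorem pvA_inv (ys : List Int) : ∀ (s : List Int), s.Nodup →
    ys.foldl
      (fun (st : PySem.Dict Int Int × Int) v =>
        if st.1.contains v then st else (st.1.insert v st.2, st.2 + 1))
      (PySem.Dict.mk (pvNumbered s 1), 1 + (s.length : Int))
    = (PySem.Dict.mk (pvNumbered (PySem.Set.update s ys) 1),
       1 + ((PySem.Set.update s ys).length : Int)) := by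
  induction ys with
  | nil => intro s _; simp [PySem.Set.update]
  | cons x ys ih =>
    intro s hs
    have hkeys : (PySem.Dict.mk (pvNumbered s 1)).keys = s := by
      simp [PySem.Dict.keys, pvNumbered_keys]
    have hcont : (PySem.Dict.mk (pvNumbered s 1)).contains x = decide (x ∈ s) := by
      rw [PySem.Dict.contains_eq_decide_mem_keys, hkeys]
    by_cases hx : x ∈ s
    · have hupd : PySem.Set.update s (x :: ys) = PySem.Set.update s ys := by
        simp [PySem.Set.update, PySem.Set.add_of_mem hx]
      rw [List.foldl_cons, hcont]
      simp only [hx, decide_true, if_true]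
      rw [ih s hs, hupd]
    · have hadd : PySem.Set.add s x = s ++ [x] := PySem.Set.add_of_not_mem hx
      have hins : (PySem.Dict.mk (pvNumbered s 1)).insert x (1 + (s.length : Int))
          = PySem.Dict.mk (pvNumbered (s ++ [x]) 1) := by
        apply PySem.Dict.ext
        rw [PySem.Dict.items_insert_of_not_contains (h := by rw [hcont]; exact decide_eq_false hx)]
        simp [pvNumbered_append_singleton]
      have hnd : (s ++ [x]).Nodup := hs.append (List.nodup_singleton x) (fun a ha hb => by simp at hb; subst hb; exact hx ha)
      have harith : 1 + (s.length : Int) + 1 = 1 + (((s ++ [x]).length : Nat) : Int) := by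
        simp; ring
      rw [List.foldl_cons, hcont]
      simp only [hx, decide_false, Bool.false_eq_true, if_false, hins]
      rw [harith, ih (s ++ [x]) hnd]
      have hupd : PySem.Set.update s (x :: ys) = PySem.Set.update (s ++ [x]) ys := by
        simp [PySem.Set.update, hadd]
      rw [hupd]

/-- B's first-stage fold, abbreviated for the lemmas. -/
def pvFirst (y : List Int) (k : Int) (d : PySem.Dict Int Int) : PySem.Dict Int Int :=
  (PySem.List.enumerate y k).reverse.foldl (fun d p => d.insert p.2 p.1) d

theorem pvFirst_cons (x : Int) (t : List Int) (k : Int) (d : PySem.Dict Int Int) :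
    pvFirst (x :: t) k d = (pvFirst t (k + 1) d).insert x k := by
  simp [pvFirst, PySem.List.enumerate_cons, List.foldl_append]

/-- the reversed overwrite pass maps each label of `y` to `k +` its first index. -/
theorem pvFirst_getD (y : List Int) : ∀ (k : Int) (d : PySem.Dict Int Int) (l : Int),
    (pvFirst y k d).getD l 0 = if l ∈ y then k + (y.idxOf l : Int) else d.getD l 0 := by
  induction y with
  | nil => intro k d l; simp [pvFirst]
  | cons x t ih =>
    intro k d l
    rw [pvFirst_cons, PySem.Dict.getD_insert]
    by_cases hl : l = x
    · subst hl; simp [List.idxOf_cons_self]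
    · simp only [hl, if_false]
      rw [ih (k + 1) d l]
      by_cases hm : l ∈ t
      · have : l ∈ x :: t := List.mem_cons_of_mem _ hm
        simp only [hm, if_true, this, if_true]
        rw [List.idxOf_cons_ne _ (by simpa using fun h => hl h.symm)]
        push_cast
        ring
      · have : l ∉ x :: t := by simp [hl, hm]
        simp [hm, this]

theorem pvFirst_mem_keys (y : List Int) : ∀ (k : Int) (d : PySem.Dict Int Int) (l : Int),
    l ∈ (pvFirst y k d).keys ↔ l ∈ y ∨ l ∈ d.keys := by
  induction y with
  | nil => intro k d l; simp [pvFirst]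
  | cons x t ih =>
    intro k d l
    rw [pvFirst_cons]
    by_cases hc : (pvFirst t (k + 1) d).contains x = true
    · rw [PySem.Dict.keys_insert_of_contains _ _ hc, ih]
      have hx : x ∈ t ∨ x ∈ d.keys := by
        refine (ih (k + 1) d x).mp ?_
        rw [PySem.Dict.contains_eq_decide_mem_keys] at hc
        simpa using hc
      simp only [List.mem_cons]
      constructor
      · tauto
      · rintro ((rfl | h) | h)
        · exact hx
        · exact Or.inl h
        · exact Or.inr h
    · rw [PySem.Dict.keys_insert_of_not_contains _ _ (by simpa using hc)]
      simp only [List.mem_append, ih, List.mem_cons]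
      tauto

theorem pvFirst_keys_nodup (y : List Int) : ∀ (k : Int) (d : PySem.Dict Int Int),
    d.keys.Nodup → (pvFirst y k d).keys.Nodup := by
  induction y with
  | nil => intro k d hd; simpa [pvFirst] using hd
  | cons x t ih =>
    intro k d hd
    rw [pvFirst_cons]
    have h := ih (k + 1) d hd
    by_cases hc : (pvFirst t (k + 1) d).contains x = true
    · rwa [PySem.Dict.keys_insert_of_contains _ _ hc]
    · rw [PySem.Dict.keys_insert_of_not_contains _ _ (by simpa using hc)]
      refine List.Nodup.append h (List.nodup_singleton x) ?_
      intro a ha hb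
      rw [List.mem_singleton] at hb; subst hb
      rw [PySem.Dict.contains_eq_decide_mem_keys] at hc
      simp at hc
      exact hc ha

/-- `Set.update s t` appends exactly the fresh first occurrences of `t`. -/
theorem pvUpdate_eq (t : List Int) : ∀ (s : List Int),
    PySem.Set.update s t = s ++ (PySem.Set.ofList t).filter (fun b => ¬ b ∈ s) := by
  induction t with
  | nil => intro s; simp [PySem.Set.update]
  | cons x t ih =>
    intro s
    have hofl : PySem.Set.ofList (x :: t) = x :: (PySem.Set.ofList t).filter (fun b => ¬ b = x) := by
      have h1 : PySem.Set.ofList (x :: t) = PySem.Set.update (PySem.Set.add [] x) t := by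
        simp [PySem.Set.ofList_eq_foldl, PySem.Set.update]
      rw [h1, ih]
      simp [PySem.Set.add]
    have hupd : PySem.Set.update s (x :: t) = PySem.Set.update (PySem.Set.add s x) t := by
      simp [PySem.Set.update]
    rw [hupd, ih, hofl]
    by_cases hx : x ∈ s
    · rw [PySem.Set.add_of_mem hx]
      congr 1
      rw [List.filter_cons_of_neg (by simp [hx]), List.filter_filter]
      apply List.filter_congr
      intro b hb
      by_cases hbs : b ∈ s
      · simp [hbs]
      · have hbx : ¬ b = x := fun h => hbs (h ▸ hx)
        simp [hbs, hbx]
    · rw [PySem.Set.add_of_not_mem hx]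
      rw [List.filter_cons_of_pos (by simp [hx]), List.append_assoc, List.singleton_append]
      congr 2
      rw [List.filter_filter]
      apply List.filter_congr
      intro b hb
      by_cases hbx : b = x
      · simp [hbx]
      · simp [hbx, List.mem_append]

/-- the ordered dedup lists its labels in strictly increasing first-index order. -/
theorem pvDedup_pairwise (y : List Int) :
    (PySem.Set.ofList y).Pairwise (fun a b => y.idxOf a < y.idxOf b) := by
  induction y with
  | nil => simp [PySem.Set.ofList]
  | cons x t ih =>
    have hofl : PySem.Set.ofList (x :: t) = x :: (PySem.Set.ofList t).filter (fun b => ¬ b = x) := by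
      have h1 : PySem.Set.ofList (x :: t) = PySem.Set.update (PySem.Set.add [] x) t := by
        simp [PySem.Set.ofList_eq_foldl, PySem.Set.update]
      rw [h1, pvUpdate_eq]
      simp [PySem.Set.add]
    rw [hofl]
    refine List.Pairwise.cons ?_ ?_
    · intro b hb
      rw [List.mem_filter] at hb
      have hbx : ¬ b = x := by simpa using hb.2
      rw [List.idxOf_cons_self, List.idxOf_cons_ne _ (by simpa using fun h => hbx h.symm)]
      omega
    · have hp : ((PySem.Set.ofList t).filter (fun b => decide (¬ b = x))).Pairwise
          (fun a b => t.idxOf a < t.idxOf b) := List.Pairwise.sublist List.filter_sublist ih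
      refine hp.imp_of_mem ?_
      intro a b ha hb hab
      rw [List.mem_filter] at ha hb
      have hax : ¬ a = x := by simpa using ha.2
      have hbx : ¬ b = x := by simpa using hb.2
      rw [List.idxOf_cons_ne _ (by simpa using fun h => hax h.symm),
          List.idxOf_cons_ne _ (by simpa using fun h => hbx h.symm)]
      omega

/-- B's final fold over distinct fresh keys just appends the swapped pairs. -/
theorem pvB_fold (l : List (Int × Int)) : ∀ (d : PySem.Dict Int Int),
    (∀ p ∈ l, d.contains p.2 = false) → (l.map (·.2)).Nodup →
    (l.foldl (fun d p => d.insert p.2 p.1) d).items = d.items ++ l.map (fun p => (p.2, p.1)) := by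
  induction l with
  | nil => intro d _ _; simp
  | cons p l ih =>
    intro d hfresh hnd
    rw [List.foldl_cons,
        ih (d.insert p.2 p.1)
          (by
            intro q hq
            rw [PySem.Dict.contains_insert]
            have h1 : (q.2 == p.2) = false := by
              simp at hnd ⊢
              intro h; exact hnd.1 q.1 (by rw [← h]; simpa using hq)
            rw [h1, hfresh q (List.mem_cons_of_mem _ hq)]
            rfl)
          (by simpa using hnd.of_cons)]
    rw [PySem.Dict.items_insert_of_not_contains (h := hfresh p (List.mem_cons_self))]
    simp

/-- sorting B's keys by their first-occurrence position yields the ordered dedup. -/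
theorem pvSorted_keys (y : List Int) :
    PySem.List.sorted (pvFirst y 0 PySem.Dict.empty).keys
      (fun label => (pvFirst y 0 PySem.Dict.empty).getD label 0)
    = PySem.Set.ofList y := by
  apply PySem.List.sorted_eq_of_perm_of_pairwise_lt
  · rw [List.perm_ext_iff_of_nodup (PySem.Set.nodup_ofList y)
        (pvFirst_keys_nodup y 0 PySem.Dict.empty (by simp [PySem.Dict.keys, PySem.Dict.empty]))]
    intro a
    rw [PySem.Set.mem_ofList, pvFirst_mem_keys]
    simp [PySem.Dict.keys, PySem.Dict.empty]
  · have hp := pvDedup_pairwise y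
    refine hp.imp_of_mem ?_
    intro a b ha hb hab
    rw [PySem.Set.mem_ofList] at ha hb
    rw [pvFirst_getD y 0 _ a, pvFirst_getD y 0 _ b]
    simp only [ha, hb, if_true]
    omega

theorem pvB_items (y : List Int) :
    get_label_voc_alt y = pvNumbered (PySem.Set.ofList y) 1 := by
  show ((PySem.List.enumerate (PySem.List.sorted (pvFirst y 0 PySem.Dict.empty).keys
          (fun label => (pvFirst y 0 PySem.Dict.empty).getD label 0)) 1).foldl
        (fun (d : PySem.Dict Int Int) p => d.insert p.2 p.1) PySem.Dict.empty).items
      = pvNumbered (PySem.Set.ofList y) 1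
  rw [pvSorted_keys]
  rw [pvB_fold _ _ (by intro p _; simp [PySem.Dict.contains_empty])
        (by rw [PySem.List.map_snd_enumerate]; exact (PySem.Set.nodup_ofList y))]
  simp [pvNumbered, PySem.Dict.empty]

-- ===== VERDICT (by name: the statement is the Claim_ definition above) =====
theorem get_label_voc_spec : Claim_equal_get_label_voc := by
  intro y _
  show get_label_voc y = get_label_voc_alt y
  unfold get_label_voc
  rw [show ((PySem.Dict.empty : PySem.Dict Int Int), (1 : Int))
        = (PySem.Dict.mk (pvNumbered [] 1), 1 + (([] : List Int).length : Int)) by rfl]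
  rw [show ((y.length : Int)) = PySem.List.len y from rfl]
  rw [PySem.List.foldl_pyRange_pyGetD y 0
        (fun (st : PySem.Dict Int Int × Int) v =>
          if st.1.contains v then st else (st.1.insert v st.2, st.2 + 1))
        (PySem.Dict.mk (pvNumbered [] 1), 1 + (([] : List Int).length : Int))
        (by norm_num)]
  simp only [Int.toNat_zero, List.drop_zero]
  rw [pvA_inv y [] List.nodup_nil]
  rw [pvB_items]
  simp [PySem.Set.update_nil_left]
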